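-- pv_equiv track=rewrite | github.com/agnel18/anki-fluent-forever-language-card-generator | languages/hungarian/domain/hu_validator.py | _has_valid_hungarian_patterns
-- ===== SOURCE A (Python) =====
-- from typing import Dict, Any, List
--
-- def _has_valid_hungarian_patterns(word_explanations: List[List[Any]]) -> bool:
--     """Check if result has valid Hungarian grammar patterns."""
--     roles = [item[1] for item in word_explanations if len(item) > 1]
--
--     # Hungarian sentences typically have a verb (conjugated)
--     has_predicate = any(
--         role in ['verb', 'definite_conjugation', 'indefinite_conjugation',
--                  'copula', 'auxiliary_verb']
--         for role in roles
--     )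
--
--     # Must have at least one content word
--     has_content = any(
--         role in ['noun', 'verb', 'adjective', 'pronoun',
--                  'definite_conjugation', 'indefinite_conjugation']
--         for role in roles
--     )
--
--     return has_content and has_predicate
-- ===== SOURCE B (Python) =====
-- ROLE_BITS = {'verb': 3, 'definite_conjugation': 3, 'indefinite_conjugation': 3,
--              'copula': 1, 'auxiliary_verb': 1,
--              'noun': 2, 'adjective': 2, 'pronoun': 2}
--
--
-- def _has_valid_hungarian_patterns(word_explanations):
--     """Classify each role via a bitmask table (bit0=predicate, bit1=content),
--     OR the bits together and test for the full mask."""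
--     mask = 0
--     for item in word_explanations:
--         if len(item) > 1:
--             mask |= ROLE_BITS.get(item[1], 0)
--     return mask == 3
-- ===== Notes on version B (the rewrite author's own statement) =====
-- stated objective: alternative
-- what changed: Replaces A's roles list plus two independent set-membership any() scans with a precomputed role-to-bitmask lookup table (bit0=predicate, bit1=content) whose bits are OR-folded in one pass and compared to the full mask 3.
import Mathlib
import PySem

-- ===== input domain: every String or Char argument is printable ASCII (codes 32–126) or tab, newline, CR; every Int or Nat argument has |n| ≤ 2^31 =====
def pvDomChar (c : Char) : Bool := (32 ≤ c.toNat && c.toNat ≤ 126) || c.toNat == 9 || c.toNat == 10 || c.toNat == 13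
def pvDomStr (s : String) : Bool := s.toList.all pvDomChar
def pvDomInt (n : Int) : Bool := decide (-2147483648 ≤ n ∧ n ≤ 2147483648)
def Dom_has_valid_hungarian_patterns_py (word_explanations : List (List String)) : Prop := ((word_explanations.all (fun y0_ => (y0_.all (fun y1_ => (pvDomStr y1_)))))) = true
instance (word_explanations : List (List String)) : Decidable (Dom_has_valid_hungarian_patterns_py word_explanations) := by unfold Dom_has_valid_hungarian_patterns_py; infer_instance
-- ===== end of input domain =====

-- B replaces A's roles list and two set-membership any() scans by a role→bitmask
-- lookup table (bit0 = predicate, bit1 = content) OR-folded in one pass and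
-- compared to the full mask 3 (alternative formulation, same cost).
-- ===== PORT A =====
def pvPredList : List String := ["verb", "definite_conjugation", "indefinite_conjugation", "copula", "auxiliary_verb"]
def pvContList : List String := ["noun", "verb", "adjective", "pronoun", "definite_conjugation", "indefinite_conjugation"]

def has_valid_hungarian_patterns_py (word_explanations : List (List String)) : Bool :=
  -- roles = [item[1] for item in word_explanations if len(item) > 1]
  let roles := word_explanations.foldl
    (fun acc item => if 1 < item.length then acc ++ [item.getD 1 ""] else acc) []
  let has_predicate := roles.any (fun role => pvPredList.contains role)
  let has_content := roles.any (fun role => pvContList.contains role)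
  has_content && has_predicate

-- ===== PORT B =====
-- ROLE_BITS: bit 0 set = predicate role, bit 1 set = content role
def pvRoleBits : PySem.Dict String Nat := PySem.Dict.mk
  [("verb", 3), ("definite_conjugation", 3), ("indefinite_conjugation", 3),
   ("copula", 1), ("auxiliary_verb", 1),
   ("noun", 2), ("adjective", 2), ("pronoun", 2)]

def has_valid_hungarian_patterns_py_alt (word_explanations : List (List String)) : Bool :=
  let mask := word_explanations.foldl
    (fun mask item =>
      if 1 < item.length then mask ||| pvRoleBits.getD (item.getD 1 "") 0 else mask) 0
  mask == 3

-- ===== PRECONDITION & SPEC =====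
def Spec_has_valid_hungarian_patterns_py (word_explanations : List (List String)) (out : Bool) : Prop := out = has_valid_hungarian_patterns_py_alt word_explanations
instance (word_explanations : List (List String)) (out : Bool) : Decidable (Spec_has_valid_hungarian_patterns_py word_explanations out) := by unfold Spec_has_valid_hungarian_patterns_py; infer_instance

-- ===== CLAIM (what is proved, stated in full; the proofs are below) =====
def Claim_equal_has_valid_hungarian_patterns_py : Prop := ∀ (word_explanations : List (List String)), Dom_has_valid_hungarian_patterns_py word_explanations → Spec_has_valid_hungarian_patterns_py word_explanations (has_valid_hungarian_patterns_py word_explanations)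

-- ===== LEMMAS AND PROOFS =====
-- A's roles list as a standalone function
def pvRoles (xs : List (List String)) : List String :=
  xs.foldl (fun acc item => if 1 < item.length then acc ++ [item.getD 1 ""] else acc) []

theorem pvRoles_foldl (xs : List (List String)) (acc : List String) :
    xs.foldl (fun acc item => if 1 < item.length then acc ++ [item.getD 1 ""] else acc) acc
      = acc ++ pvRoles xs := by
  induction xs generalizing acc with
  | nil => simp [pvRoles]
  | cons x xs ih =>
    simp only [pvRoles, List.foldl_cons, List.nil_append]
    by_cases h : 1 < x.length
    · rw [if_pos h, if_pos h, ih, ih ([x.getD 1 ""])]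
      simp
    · rw [if_neg h, if_neg h, ih, ih]
      simp

theorem pvRoles_cons (x : List String) (xs : List (List String)) :
    pvRoles (x :: xs)
      = (if 1 < x.length then [x.getD 1 ""] else []) ++ pvRoles xs := by
  by_cases h : 1 < x.length
  · simp only [pvRoles, List.foldl_cons, List.nil_append, if_pos h]
    simpa [pvRoles] using pvRoles_foldl xs [x.getD 1 ""]
  · simp [pvRoles, List.foldl_cons, if_neg h]

-- the two-bit encoding of a (predicate?, content?) pair
def pvEncode (p c : Bool) : Nat := (if c then 2 else 0) + (if p then 1 else 0)

theorem pvRoleBits_getD (r : String) :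
    pvRoleBits.getD r 0 = pvEncode (pvPredList.contains r) (pvContList.contains r) := by
  by_cases h1 : r = "verb"
  · subst h1; decide
  by_cases h2 : r = "definite_conjugation"
  · subst h2; decide
  by_cases h3 : r = "indefinite_conjugation"
  · subst h3; decide
  by_cases h4 : r = "copula"
  · subst h4; decide
  by_cases h5 : r = "auxiliary_verb"
  · subst h5; decide
  by_cases h6 : r = "noun"
  · subst h6; decide
  by_cases h7 : r = "adjective"
  · subst h7; decide
  by_cases h8 : r = "pronoun"
  · subst h8; decide
  simp [pvRoleBits, pvEncode, pvPredList, pvContList, PySem.Dict.getD, PySem.Dict.get?, h1, h2, h3, h4, h5, h6, h7, h8, Ne.symm h1, Ne.symm h2,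
        Ne.symm h3, Ne.symm h4, Ne.symm h5, Ne.symm h6, Ne.symm h7, Ne.symm h8]

theorem pvEncode_lor (p c p' c' : Bool) :
    pvEncode p c ||| pvEncode p' c' = pvEncode (p || p') (c || c') := by
  cases p <;> cases c <;> cases p' <;> cases c' <;> decide

theorem pvMaskFold_eq (xs : List (List String)) (p c : Bool) :
    xs.foldl
      (fun mask item =>
        if 1 < item.length then mask ||| pvRoleBits.getD (item.getD 1 "") 0 else mask)
      (pvEncode p c)
      = pvEncode (p || (pvRoles xs).any (fun r => pvPredList.contains r))
                 (c || (pvRoles xs).any (fun r => pvContList.contains r)) := by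
  induction xs generalizing p c with
  | nil => simp [pvRoles]
  | cons x xs ih =>
    rw [pvRoles_cons]
    simp only [List.foldl_cons]
    by_cases h : 1 < x.length
    · rw [if_pos h, if_pos h, pvRoleBits_getD, pvEncode_lor, ih]
      simp [Bool.or_assoc]
    · rw [if_neg h, if_neg h, ih]
      simp

theorem pvEncode_eq_three (p c : Bool) : (pvEncode p c == 3) = (c && p) := by
  cases p <;> cases c <;> decide

-- ===== VERDICT (by name: the statement is the Claim_ definition above) =====
theorem pvMask_zero (xs : List (List String)) :
    xs.foldl
      (fun mask item =>
        if 1 < item.length then mask ||| pvRoleBits.getD (item.getD 1 "") 0 else mask) 0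
      = pvEncode ((pvRoles xs).any fun r => pvPredList.contains r)
                 ((pvRoles xs).any fun r => pvContList.contains r) := by
  simpa only [Bool.false_or] using pvMaskFold_eq xs false false

theorem has_valid_hungarian_patterns_py_spec : Claim_equal_has_valid_hungarian_patterns_py := by
  intro xs _
  unfold Spec_has_valid_hungarian_patterns_py has_valid_hungarian_patterns_py has_valid_hungarian_patterns_py_alt
  simp only [pvMask_zero, pvEncode_eq_three]
  rfl
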